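-- pv_equiv track=rewrite | github.com/d4rth-f4der/Univer_python | Lab-04/Lab-04-09.py | take_every_second_digit
-- ===== SOURCE A (Python) =====
-- def take_every_second_digit(num: int) -> int:
--     out_number = 0
--     decimal_place = 1
--
--     while num > 0:
--         inspect_digit = num % 10
--         out_number += inspect_digit * decimal_place
--         decimal_place *= 10
--         num = num // 100
--     return out_number
-- ===== SOURCE B (Python) =====
-- def take_every_second_digit(num: int) -> int:
--     if num <= 0:
--         return 0
--     return num % 10 + 10 * take_every_second_digit(num // 100)
-- ===== Notes on version B (the rewrite author's own statement) =====
-- stated objective: simpler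
-- what changed: Replaces the while loop that threads an accumulator and an explicit decimal_place multiplier with a direct structural recursion (strip the last two digits and recurse) that needs no auxiliary state.
import Mathlib
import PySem

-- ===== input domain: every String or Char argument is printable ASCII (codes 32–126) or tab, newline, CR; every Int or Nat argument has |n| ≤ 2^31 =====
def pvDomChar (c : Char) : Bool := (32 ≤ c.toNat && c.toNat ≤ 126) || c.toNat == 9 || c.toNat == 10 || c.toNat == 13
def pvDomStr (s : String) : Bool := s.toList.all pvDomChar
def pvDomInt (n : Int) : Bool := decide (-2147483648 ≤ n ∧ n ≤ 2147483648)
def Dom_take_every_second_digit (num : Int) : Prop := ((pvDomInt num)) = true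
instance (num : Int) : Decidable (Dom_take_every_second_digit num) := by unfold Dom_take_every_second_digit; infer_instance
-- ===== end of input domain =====

-- B is a simpler accumulator-free structural recursion; the return value is proved equal to A's.

-- termination fact shared by both ports: num // 100 shrinks toward 0
theorem pv_floordiv100_lt (num : Int) (h : 0 < num) :
    (PySem.Int.floordiv num 100).toNat < num.toNat := by
  have he : PySem.Int.floordiv num 100 = num / 100 :=
    PySem.Int.floordiv_eq_ediv_of_pos (by omega)
  rw [he]
  have h2 := Int.mul_ediv_add_emod num 100
  have h3 := Int.emod_nonneg num (by omega : (100:Int) ≠ 0)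
  have h4 := Int.emod_lt_of_pos num (by omega : (0:Int) < 100)
  omega

-- ===== PORT A =====
-- A's while loop, transcribed as recursion over the loop state (num, out_number, decimal_place)
def take_every_second_digit_loop (num out_number decimal_place : Int) : Int :=
  if h : num > 0 then
    take_every_second_digit_loop (PySem.Int.floordiv num 100)
      (out_number + PySem.Int.mod num 10 * decimal_place) (decimal_place * 10)
  else out_number
termination_by num.toNat
decreasing_by exact pv_floordiv100_lt num h

def take_every_second_digit (num : Int) : Int :=
  take_every_second_digit_loop num 0 1

-- ===== PORT B =====
def take_every_second_digit_alt (num : Int) : Int :=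
  if h : num ≤ 0 then 0
  else PySem.Int.mod num 10 + 10 * take_every_second_digit_alt (PySem.Int.floordiv num 100)
termination_by num.toNat
decreasing_by exact pv_floordiv100_lt num (by omega)

-- ===== PRECONDITION & SPEC =====
def Spec_take_every_second_digit (num : Int) (out : Int) : Prop := out = take_every_second_digit_alt num
instance (num : Int) (out : Int) : Decidable (Spec_take_every_second_digit num out) := by unfold Spec_take_every_second_digit; infer_instance

-- ===== CLAIM (what is proved, stated in full; the proofs are below) =====
def Claim_equal_take_every_second_digit : Prop := ∀ (num : Int), Dom_take_every_second_digit num → Spec_take_every_second_digit num (take_every_second_digit num)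

-- ===== LEMMAS AND PROOFS =====

theorem loop_eq_alt (n : Nat) : ∀ (num out place : Int), num.toNat ≤ n →
    take_every_second_digit_loop num out place = out + place * take_every_second_digit_alt num := by
  induction n with
  | zero =>
    intro num out place hle
    have h0 : num ≤ 0 := by omega
    rw [take_every_second_digit_loop, take_every_second_digit_alt]
    simp [h0, Int.not_lt.mpr h0]
  | succ n ih =>
    intro num out place hle
    rw [take_every_second_digit_loop, take_every_second_digit_alt]
    by_cases h : num > 0
    · have hlt := pv_floordiv100_lt num h
      rw [dif_pos h, dif_neg (by omega : ¬ num ≤ 0),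
        ih (PySem.Int.floordiv num 100) _ _ (by omega)]
      ring
    · simp [h, (by omega : num ≤ 0)]

-- ===== VERDICT (by name: the statement is the Claim_ definition above) =====
theorem take_every_second_digit_spec : Claim_equal_take_every_second_digit := by
  intro num _
  unfold Spec_take_every_second_digit take_every_second_digit
  rw [loop_eq_alt num.toNat num 0 1 le_rfl]
  ring
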